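-- pv_equiv track=rewrite | github.com/alexandraback/datacollection | solutions_5744014401732608_0/Python/mdrm/problem_B.py | make_mat
-- ===== SOURCE A (Python) =====
-- def make_mat(B,x):
--     first = [1] * (B)
--     res = []
--     b = 1
--     for i in range(B):
--         first[i] = 0
--         first[B-1] = (x & b)//b
--         res.append(first[:])
--         b*=2
--     return [''.join(map(str,r)) for r in res]
-- ===== SOURCE B (Python) =====
-- def make_mat(B, x):
--     # Each row i: min(i+1, B-1) leading zeros, then ones, then bit i of x last.
--     return ['0' * min(i + 1, B - 1) + '1' * max(B - 2 - i, 0) + str((x // 2 ** i) % 2)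
--             for i in range(B)]
-- ===== Notes on version B (the rewrite author's own statement) =====
-- stated objective: simpler
-- what changed: Replaced the shared mutable row list (slice-copied and re-mutated every iteration, with a growing bignum mask x & 2**i) by an independent closed-form row per index: '0'*min(i+1,B-1) + '1'*max(B-2-i,0) + the i-th bit of x, with no cross-iteration state.
import Mathlib
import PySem

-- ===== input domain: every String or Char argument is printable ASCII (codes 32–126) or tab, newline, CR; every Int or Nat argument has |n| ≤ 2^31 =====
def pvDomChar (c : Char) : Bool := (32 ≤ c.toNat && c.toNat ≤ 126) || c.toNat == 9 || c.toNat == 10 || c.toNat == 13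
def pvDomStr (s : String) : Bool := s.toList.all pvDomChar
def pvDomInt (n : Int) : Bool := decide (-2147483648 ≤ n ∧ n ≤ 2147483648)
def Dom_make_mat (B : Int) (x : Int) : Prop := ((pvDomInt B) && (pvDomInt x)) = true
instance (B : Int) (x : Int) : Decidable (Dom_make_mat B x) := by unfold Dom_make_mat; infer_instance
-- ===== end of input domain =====

-- B builds each row independently from a closed-form count of zeros/ones plus the i-th bit of x,
-- instead of A's shared mutable row that is mutated and slice-copied each iteration (objective: simpler; both total).

-- ===== PORT A =====
-- loop body of A: first[i] = 0; first[B-1] = (x & b)//b; res.append(first[:]); b *= 2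
-- (indices i and B-1 are nonnegative and in range whenever the loop body runs, so List.set at .toNat is exact)
def pvStepA (B : Int) (x : Int) (st : List Int × List (List Int) × Int) (i : Int) :
    List Int × List (List Int) × Int :=
  let first := st.1.set i.toNat 0
  let first := first.set (B - 1).toNat (PySem.Int.floordiv (PySem.Int.band x st.2.2) st.2.2)
  (first, st.2.1 ++ [first], st.2.2 * 2)

def make_mat (B : Int) (x : Int) : List String :=
  let first : List Int := List.replicate B.toNat 1   -- [1]*B ([] when B ≤ 0, like Python)
  let st := (PySem.List.pyRange 0 B 1).foldl (pvStepA B x) (first, [], 1)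
  st.2.1.map (fun r => PySem.Str.join "" (r.map PySem.Int.toStr))

-- ===== PORT B =====
-- '0'*min(i+1,B-1) + '1'*max(B-2-i,0) + str((x // 2**i) % 2)  (string repetition clamps at 0, as .toNat does)
def make_mat_alt (B : Int) (x : Int) : List String :=
  (PySem.List.pyRange 0 B 1).map (fun i =>
    String.ofList (List.replicate (min (i + 1) (B - 1)).toNat '0'
      ++ List.replicate (max (B - 2 - i) 0).toNat '1'
      ++ PySem.Int.toChars (PySem.Int.mod (PySem.Int.floordiv x (2 ^ i.toNat)) 2)))

-- ===== PRECONDITION & SPEC =====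
def Spec_make_mat (B : Int) (x : Int) (out : List String) : Prop := out = make_mat_alt B x
instance (B : Int) (x : Int) (out : List String) : Decidable (Spec_make_mat B x out) := by unfold Spec_make_mat; infer_instance

-- ===== CLAIM (what is proved, stated in full; the proofs are below) =====
def Claim_equal_make_mat : Prop := ∀ (B : Int) (x : Int), Dom_make_mat B x → Spec_make_mat B x (make_mat B x)

-- ===== LEMMAS AND PROOFS =====

theorem pv_mod_natCast (u : Nat) : PySem.Int.mod (u : Int) 2 = ((u % 2 : Nat) : Int) := by
  simp [PySem.Int.mod, Int.fmod_eq_emod]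

-- bit extraction: (x & 2^k) // 2^k = (x // 2^k) % 2 under Python floor semantics, for any sign of x
theorem pv_bit_eq (x : Int) (k : Nat) :
    PySem.Int.floordiv (PySem.Int.band x ((2:Int) ^ k)) ((2:Int) ^ k)
      = PySem.Int.mod (PySem.Int.floordiv x ((2:Int) ^ k)) 2 := by
  have hp : (0:Int) < 2 ^ k := by positivity
  have hpn : 0 < 2 ^ k := Nat.two_pow_pos k
  have hcast : ((2:Int) ^ k) = ((2 ^ k : Nat) : Int) := by push_cast; ring
  have htb : ∀ n : Nat, (n.testBit k).toNat = n / 2 ^ k % 2 := by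
    intro n
    have h : n.testBit k = ((n / 2 ^ k) % 2 == 1) := by
      simp [Nat.testBit, Nat.shiftRight_eq_div_pow]
    rw [h]
    rcases Nat.mod_two_eq_zero_or_one (n / 2 ^ k) with h | h <;> simp [h]
  rcases le_or_gt 0 x with hx | hx
  · obtain ⟨n, rfl⟩ : ∃ n : Nat, x = (n : Int) := ⟨x.toNat, (Int.toNat_of_nonneg hx).symm⟩
    rw [hcast, PySem.Int.band_natCast, Nat.and_two_pow, PySem.Int.floordiv_natCast,
      PySem.Int.floordiv_natCast, Nat.mul_div_cancel _ hpn, pv_mod_natCast]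
    exact_mod_cast htb n
  · set m : Nat := (-x - 1).toNat with hm
    have hxm : x = -(m : Int) - 1 := by omega
    set t : Nat := (m.testBit k).toNat with htdef
    have h1 : t ≤ 1 := by rw [htdef]; cases m.testBit k <;> simp
    have ht : t = m / 2 ^ k % 2 := htb m
    have hband : PySem.Int.band x ((2:Int) ^ k) = ((2 ^ k - t * 2 ^ k : Nat) : Int) := by
      rw [PySem.Int.band, if_neg (by omega), if_pos (le_of_lt hp)]
      have h2 : ((2:Int) ^ k).toNat = 2 ^ k := by rw [hcast]; exact Int.toNat_natCast _
      rw [h2, ← hm, Nat.land_comm, Nat.and_two_pow, ← htdef]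
    have hlhs : PySem.Int.floordiv (PySem.Int.band x ((2:Int) ^ k)) ((2:Int) ^ k)
        = ((1 - t : Nat) : Int) := by
      rw [hband, hcast, PySem.Int.floordiv_natCast]
      congr 1
      rcases Nat.le_one_iff_eq_zero_or_eq_one.mp h1 with h | h <;> rw [h]
      · simpa using Nat.div_self hpn
      · simp
    have hdm : (2 ^ k : Int) * ((m / 2 ^ k : Nat) : Int) + ((m % 2 ^ k : Nat) : Int) = (m : Int) := by
      rw [hcast]; exact_mod_cast Nat.div_add_mod m (2 ^ k)
    have hmlt : ((m % 2 ^ k : Nat) : Int) < (2:Int) ^ k := by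
      rw [hcast]; exact_mod_cast Nat.mod_lt _ hpn
    have hmnn : (0:Int) ≤ ((m % 2 ^ k : Nat) : Int) := by positivity
    have hrhs : PySem.Int.floordiv x ((2:Int) ^ k) = -((m / 2 ^ k : Nat) : Int) - 1 := by
      rw [PySem.Int.floordiv_eq_ediv_of_pos hp]
      have huniq := (Int.ediv_emod_unique (a := x) (b := (2:Int) ^ k)
        (q := -((m / 2 ^ k : Nat) : Int) - 1) (r := (2:Int) ^ k - 1 - ((m % 2 ^ k : Nat) : Int)) hp).mpr
        ⟨by rw [hxm]; linear_combination -hdm, by omega, by omega⟩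
      exact huniq.1
    rw [hlhs, hrhs]
    have hmod : PySem.Int.mod (-((m / 2 ^ k : Nat) : Int) - 1) 2
        = (-((m / 2 ^ k : Nat) : Int) - 1) % 2 := by
      simp [PySem.Int.mod, Int.fmod_eq_emod]
    rw [hmod]
    omega

-- state of A's list `first` after k iterations of the loop (k = 0: the initial all-ones row)
def pvRow (Bn : Nat) (x : Int) (k : Nat) : List Int :=
  List.replicate (min k (Bn - 1)) 0 ++ List.replicate (Bn - 1 - k) 1 ++
    [if k = 0 then 1 else PySem.Int.mod (PySem.Int.floordiv x (2 ^ (k - 1))) 2]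

theorem pvRow_zero (Bn : Nat) (x : Int) (hB : 1 ≤ Bn) : pvRow Bn x 0 = List.replicate Bn 1 := by
  rw [pvRow]
  simp
  rw [show Bn = (Bn - 1) + 1 from by omega, List.replicate_succ']
  simp

theorem pvRow_length (Bn : Nat) (x : Int) (k : Nat) (hB : 1 ≤ Bn) (hk : k ≤ Bn) :
    (pvRow Bn x k).length = Bn := by
  simp [pvRow]; omega

theorem pvRow_get (Bn : Nat) (x : Int) (k j : Nat) (hB : 1 ≤ Bn) (hk : k ≤ Bn)
    (h : j < (pvRow Bn x k).length) :
    (pvRow Bn x k)[j] =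
      if j < min k (Bn - 1) then 0
      else if j = Bn - 1 then
        (if k = 0 then 1 else PySem.Int.mod (PySem.Int.floordiv x (2 ^ (k - 1))) 2)
      else 1 := by
  have hlen := pvRow_length Bn x k hB hk
  have hj : j < Bn := hlen ▸ h
  have hab : min k (Bn - 1) + (Bn - 1 - k) = Bn - 1 := by omega
  by_cases h0 : j < min k (Bn - 1)
  · rw [if_pos h0]
    simp only [pvRow]
    rw [List.getElem_append_left (by simp; omega), List.getElem_append_left (by simpa using h0),
      List.getElem_replicate]
  · rw [if_neg h0]
    by_cases h1 : j = Bn - 1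
    · rw [if_pos h1]
      simp only [pvRow]
      rw [List.getElem_append_right (by simp; omega)]
      simp
    · rw [if_neg h1]
      simp only [pvRow]
      rw [List.getElem_append_left (by simp; omega), List.getElem_append_right (by simp; omega),
        List.getElem_replicate]

theorem pvRow_step (Bn : Nat) (x : Int) (k : Nat) (hB : 1 ≤ Bn) (hk : k < Bn) :
    ((pvRow Bn x k).set k 0).set (Bn - 1)
        (PySem.Int.mod (PySem.Int.floordiv x (2 ^ k)) 2) = pvRow Bn x (k + 1) := by
  have hlen := pvRow_length Bn x k hB (le_of_lt hk)
  apply List.ext_getElem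
  · simp [pvRow_length Bn x (k + 1) hB (by omega), hlen]
  · intro j h1 h2
    have hj : j < Bn := by simpa [hlen] using h1
    rw [List.getElem_set, List.getElem_set,
      pvRow_get Bn x k j hB (le_of_lt hk) (by omega),
      pvRow_get Bn x (k + 1) j hB (by omega)
        (by rw [pvRow_length Bn x (k + 1) hB (by omega)]; omega)]
    have hk1 : ¬ (k + 1 = 0) := by omega
    rw [if_neg hk1]
    simp only [Nat.add_sub_cancel]
    split_ifs <;> first | rfl | omega

-- the loop invariant of A: after k iterations the state is (pvRow k, the first k rows, b = 2^k)
theorem pvLoop (B x : Int) (hB : 0 < B) (k : Nat) (hk : (k : Int) ≤ B) :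
    (PySem.List.pyRange 0 (k : Int) 1).foldl (pvStepA B x) (List.replicate B.toNat 1, [], 1)
      = (pvRow B.toNat x k, (List.range k).map (fun j => pvRow B.toNat x (j + 1)), 2 ^ k) := by
  have hB1 : 1 ≤ B.toNat := by omega
  induction k with
  | zero =>
    rw [show ((0:Nat):Int) = 0 from rfl, PySem.List.pyRange_one_eq_nil (le_refl 0)]
    simp [pvRow_zero B.toNat x hB1]
  | succ k ih =>
    have hk' : (k : Int) ≤ B := by push_cast at hk ⊢; omega
    have hkB : k < B.toNat := by omega
    rw [show ((k + 1 : Nat) : Int) = (k : Int) + 1 from by push_cast; ring,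
      PySem.List.pyRange_one_succ_right (by positivity), List.foldl_append, ih hk']
    simp only [List.foldl_cons, List.foldl_nil]
    rw [pvStepA]
    simp only [Int.toNat_natCast]
    rw [pv_bit_eq x k]
    have htn : (B - 1).toNat = B.toNat - 1 := by omega
    rw [htn, pvRow_step B.toNat x k hB1 hkB]
    rw [List.range_succ, List.map_append]
    simp [pow_succ]

theorem pv_flatten_rep (n : Nat) (c : Char) : (List.replicate n [c]).flatten = List.replicate n c := by
  induction n with
  | zero => rfl
  | succ m ih => simp [List.replicate_succ, ih]

theorem pv_join_nil_flatten (l : List (List Char)) : PySem.Chars.join [] l = l.flatten := by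
  induction l with
  | nil => rfl
  | cons a t ih =>
    cases t with
    | nil => simp [PySem.Chars.join, List.intercalate]
    | cons b t' =>
      have h := PySem.Chars.join_cons_cons [] a b t'
      simp [h, ih]

theorem pv_main (B x : Int) : make_mat B x = make_mat_alt B x := by
  by_cases hB : 0 < B
  · obtain ⟨n, rfl⟩ : ∃ n : Nat, B = (n : Int) := ⟨B.toNat, by omega⟩
    simp only [make_mat, make_mat_alt]
    rw [pvLoop _ x hB n (le_refl _), PySem.List.pyRange_one]
    simp only [List.map_map, Int.sub_zero, Int.toNat_natCast]
    apply List.map_congr_left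
    intro j hj
    have hjB : j < n := List.mem_range.mp hj
    apply String.toList_inj.mp
    simp only [Function.comp_apply]
    rw [PySem.Str.toList_join]
    have h0 : ("" : String).toList = [] := rfl
    rw [h0, pv_join_nil_flatten, pvRow]
    simp only [List.map_append, List.map_replicate, List.map_cons, List.map_nil,
      PySem.Int.toList_toStr, List.flatten_append, List.flatten_cons,
      List.flatten_nil, List.append_nil]
    have hc0 : PySem.Int.toChars 0 = ['0'] := rfl
    have hc1 : PySem.Int.toChars 1 = ['1'] := rfl
    have htl : ∀ l : List Char, (String.ofList l).toList = l := by intro l; simp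
    rw [htl, hc0, hc1, pv_flatten_rep, pv_flatten_rep, if_neg (by omega : ¬ (j + 1 = 0))]
    simp only [Nat.add_sub_cancel]
    have e1 : (min ((0 + (j:Int)) + 1) ((n:Int) - 1)).toNat = min (j + 1) (((n:Int)).toNat - 1) := by omega
    have e2 : (max ((n:Int) - 2 - (0 + (j:Int))) 0).toNat = ((n:Int)).toNat - 1 - (j + 1) := by omega
    have e3 : ((0 + (j:Int)).toNat) = j := by omega
    rw [e1, e2, e3]
    simp only [Int.toNat_natCast]
  · unfold make_mat make_mat_alt
    rw [PySem.List.pyRange_one_eq_nil (by omega)]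
    simp

-- ===== VERDICT (by name: the statement is the Claim_ definition above) =====
theorem make_mat_spec : Claim_equal_make_mat := by
  intro B x _
  unfold Spec_make_mat
  exact pv_main B x
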